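-- pv_equiv track=rewrite | github.com/wanxm16/tso_standard | src/pipeline/feature_builder.py | extract_suffix
-- ===== SOURCE A (Python) =====
-- def extract_suffix(name: str) -> str:
--     """识别常见字段后缀：_id / _no / _bh / _dm / _mc / _sj / _rq 等。"""
--     if not name:
--         return ""
--     lower = name.lower()
--     for suf in ["_id", "_no", "_bh", "_dm", "_mc", "_sj", "_rq", "_time", "_date", "_name", "_code", "_type"]:
--         if lower.endswith(suf):
--             return suf.lstrip("_")
--     return ""
-- ===== SOURCE B (Python) =====
-- _SUFFIXES = frozenset(["_id", "_no", "_bh", "_dm", "_mc", "_sj", "_rq",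
--                        "_time", "_date", "_name", "_code", "_type"])
--
--
-- def extract_suffix(name: str) -> str:
--     lower = name.lower()
--     if "_" not in lower:
--         return ""
--     seg = lower.rsplit("_", 1)[1]
--     return seg if "_" + seg in _SUFFIXES else ""
-- ===== Notes on version B (the rewrite author's own statement) =====
-- stated objective: alternative
-- what changed: Instead of scanning all twelve suffixes with endswith, B derives the single trailing underscore-segment once (rsplit) and does one frozenset lookup; correct because no known suffix is a suffix of another.
import Mathlib
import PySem

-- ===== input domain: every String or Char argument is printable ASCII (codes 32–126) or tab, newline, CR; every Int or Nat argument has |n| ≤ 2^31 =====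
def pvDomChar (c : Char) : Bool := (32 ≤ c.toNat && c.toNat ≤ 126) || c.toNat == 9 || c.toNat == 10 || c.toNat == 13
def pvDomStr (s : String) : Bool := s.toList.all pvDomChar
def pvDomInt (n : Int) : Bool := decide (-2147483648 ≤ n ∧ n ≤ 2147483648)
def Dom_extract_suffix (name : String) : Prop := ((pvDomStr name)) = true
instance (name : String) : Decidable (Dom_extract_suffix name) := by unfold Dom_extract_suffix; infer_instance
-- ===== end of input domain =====

-- B derives the trailing underscore-segment once and does one set lookup instead of
-- scanning the twelve suffixes with endswith (objective: alternative decomposition).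

-- ===== PORT A =====
def pvSuffixes : List String :=
  ["_id", "_no", "_bh", "_dm", "_mc", "_sj", "_rq", "_time", "_date", "_name", "_code", "_type"]

-- suf.lstrip("_") ported by hand (exact: drops all leading '_' characters)
def pvLstripUnderscore (s : String) : String :=
  String.ofList (s.toList.dropWhile (fun c => c == '_'))

def pvLoopA (lower : String) : List String → String
  | [] => ""
  | suf :: rest =>
      if PySem.Str.endswith lower suf then pvLstripUnderscore suf else pvLoopA lower rest

def extract_suffix (name : String) : String :=
  if name = "" then "" else pvLoopA (PySem.Str.lower name) pvSuffixes

-- ===== PORT B =====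
def pvSuffixSet : PySem.Set String :=
  PySem.Set.ofList
    ["_id", "_no", "_bh", "_dm", "_mc", "_sj", "_rq", "_time", "_date", "_name", "_code", "_type"]

-- lower.rsplit("_", 1)[1] ported by hand (exact when '_' occurs in lower:
-- with maxsplit 1 the last piece is the segment after the LAST '_')
def pvLastSeg (lower : String) : String :=
  String.ofList ((lower.toList.reverse.takeWhile (fun c => c != '_')).reverse)

def extract_suffix_alt (name : String) : String :=
  let lower := PySem.Str.lower name
  if PySem.Str.isIn "_" lower then
    let seg := pvLastSeg lower
    if PySem.Set.contains pvSuffixSet ("_" ++ seg) then seg else ""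
  else ""

-- ===== PRECONDITION & SPEC =====
def Spec_extract_suffix (name : String) (out : String) : Prop := out = extract_suffix_alt name
instance (name : String) (out : String) : Decidable (Spec_extract_suffix name out) := by unfold Spec_extract_suffix; infer_instance

-- ===== CLAIM (what is proved, stated in full; the proofs are below) =====
def Claim_equal_extract_suffix : Prop := ∀ (name : String), Dom_extract_suffix name → Spec_extract_suffix name (extract_suffix name)

-- ===== LEMMAS AND PROOFS =====

-- a list ends in t ++ ['_'] (read reversed: the input starts, after reversing, with t then '_')
-- iff '_' occurs and the maximal '_'-free prefix is exactly t
lemma pv_key (r t : List Char) (hn : '_' ∉ t) :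
    (t ++ ['_'] <+: r) ↔ ('_' ∈ r ∧ r.takeWhile (fun c => c != '_') = t) := by
  induction r generalizing t with
  | nil => simp
  | cons c r' ih =>
    cases t with
    | nil =>
      by_cases hc : c = '_'
      · subst hc; simp [List.takeWhile_cons]
      · simp [List.takeWhile_cons, hc, List.cons_prefix_cons, Ne.symm hc]
    | cons a t' =>
      simp only [List.mem_cons, not_or] at hn
      obtain ⟨ha, hn'⟩ := hn
      by_cases hc : c = a
      · subst hc
        simp [List.cons_prefix_cons, List.takeWhile_cons, ha, ih t' hn', Ne.symm ha]
      · constructor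
        · intro h
          rw [List.cons_append, List.cons_prefix_cons] at h
          exact absurd h.1.symm hc
        · rintro ⟨-, htw⟩
          rw [List.takeWhile_cons] at htw
          by_cases hcu : c = '_'
          · simp [hcu] at htw
          · simp [hcu] at htw
            exact absurd htw.1 hc

lemma pv_endswith_char (lower : String) (s : String) (t : List Char)
    (hs : s.toList = '_' :: t) (hn : '_' ∉ t) :
    PySem.Str.endswith lower s = true ↔
      ('_' ∈ lower.toList ∧ (pvLastSeg lower).toList = t) := by
  have h1 : PySem.Str.endswith lower s = true ↔ ('_' :: t) <:+ lower.toList := by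
    rw [PySem.Str.endswith_eq, hs, PySem.Chars.endswith_iff]
  rw [h1, ← List.reverse_prefix]
  have h2 : ('_' :: t).reverse = t.reverse ++ ['_'] := by simp
  rw [h2, pv_key _ _ (by simpa using hn)]
  constructor
  · rintro ⟨hm, htw⟩
    refine ⟨by simpa using hm, ?_⟩
    simp [pvLastSeg, htw]
  · rintro ⟨hm, hseg⟩
    refine ⟨by simpa using hm, ?_⟩
    have : ((lower.toList.reverse.takeWhile (fun c => c != '_')).reverse) = t := by
      have := hseg
      simpa [pvLastSeg] using this
    rw [← this]; simp

lemma pv_endswith_false (lower s : String) (h : '_' ∉ lower.toList)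
    (hs : '_' ∈ s.toList) : PySem.Str.endswith lower s = false := by
  rw [Bool.eq_false_iff]
  intro hc
  rw [PySem.Str.endswith_eq, PySem.Chars.endswith_iff] at hc
  exact h (hc.subset hs)

lemma pv_loopA_empty (lower : String) (l : List String)
    (h : ∀ suf ∈ l, PySem.Str.endswith lower suf = false) : pvLoopA lower l = "" := by
  induction l with
  | nil => rfl
  | cons suf rest ih =>
    rw [pvLoopA, h suf (List.mem_cons_self), ih (fun s hs => h s (List.mem_cons_of_mem _ hs))]
    simp

lemma pv_table (seg : String) :
    (if seg.toList = ['i','d'] then "id" else if seg.toList = ['n','o'] then "no" else if seg.toList = ['b','h'] then "bh" else if seg.toList = ['d','m'] then "dm" else if seg.toList = ['m','c'] then "mc" else if seg.toList = ['s','j'] then "sj" else if seg.toList = ['r','q'] then "rq" else if seg.toList = ['t','i','m','e'] then "time" else if seg.toList = ['d','a','t','e'] then "date" else if seg.toList = ['n','a','m','e'] then "name" else if seg.toList = ['c','o','d','e'] then "code" else if seg.toList = ['t','y','p','e'] then "type" else "")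
    = (if (seg.toList = ['i','d'] ∨ seg.toList = ['n','o'] ∨ seg.toList = ['b','h'] ∨ seg.toList = ['d','m'] ∨ seg.toList = ['m','c'] ∨ seg.toList = ['s','j'] ∨ seg.toList = ['r','q'] ∨ seg.toList = ['t','i','m','e'] ∨ seg.toList = ['d','a','t','e'] ∨ seg.toList = ['n','a','m','e'] ∨ seg.toList = ['c','o','d','e'] ∨ seg.toList = ['t','y','p','e']) then seg else "") := by
  by_cases h0 : seg.toList = ['i','d']
  · have hseg : seg = "id" := String.ext_iff.mpr (by rw [h0]; decide)
    simp [h0, hseg]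
  by_cases h1 : seg.toList = ['n','o']
  · have hseg : seg = "no" := String.ext_iff.mpr (by rw [h1]; decide)
    simp [h1, hseg]
  by_cases h2 : seg.toList = ['b','h']
  · have hseg : seg = "bh" := String.ext_iff.mpr (by rw [h2]; decide)
    simp [h2, hseg]
  by_cases h3 : seg.toList = ['d','m']
  · have hseg : seg = "dm" := String.ext_iff.mpr (by rw [h3]; decide)
    simp [h3, hseg]
  by_cases h4 : seg.toList = ['m','c']
  · have hseg : seg = "mc" := String.ext_iff.mpr (by rw [h4]; decide)
    simp [h4, hseg]
  by_cases h5 : seg.toList = ['s','j']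
  · have hseg : seg = "sj" := String.ext_iff.mpr (by rw [h5]; decide)
    simp [h5, hseg]
  by_cases h6 : seg.toList = ['r','q']
  · have hseg : seg = "rq" := String.ext_iff.mpr (by rw [h6]; decide)
    simp [h6, hseg]
  by_cases h7 : seg.toList = ['t','i','m','e']
  · have hseg : seg = "time" := String.ext_iff.mpr (by rw [h7]; decide)
    simp [h7, hseg]
  by_cases h8 : seg.toList = ['d','a','t','e']
  · have hseg : seg = "date" := String.ext_iff.mpr (by rw [h8]; decide)
    simp [h8, hseg]
  by_cases h9 : seg.toList = ['n','a','m','e']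
  · have hseg : seg = "name" := String.ext_iff.mpr (by rw [h9]; decide)
    simp [h9, hseg]
  by_cases h10 : seg.toList = ['c','o','d','e']
  · have hseg : seg = "code" := String.ext_iff.mpr (by rw [h10]; decide)
    simp [h10, hseg]
  by_cases h11 : seg.toList = ['t','y','p','e']
  · have hseg : seg = "type" := String.ext_iff.mpr (by rw [h11]; decide)
    simp [h11, hseg]
  simp [h0, h1, h2, h3, h4, h5, h6, h7, h8, h9, h10, h11]


-- ===== VERDICT (by name: the statement is the Claim_ definition above) =====
theorem extract_suffix_spec : Claim_equal_extract_suffix := by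
  intro name _
  unfold Spec_extract_suffix
  by_cases hn : name = ""
  · subst hn; decide
  · rw [extract_suffix, if_neg hn]
    set lower := PySem.Str.lower name with hlow
    by_cases hu : '_' ∈ lower.toList
    · -- '_' occurs: both reduce to a question about the trailing segment
      have hisin : PySem.Str.isIn "_" lower = true := by
        rw [PySem.Str.isIn_iff_infix]
        simpa using (List.singleton_infix_iff '_' lower.toList).mpr hu
      rw [extract_suffix_alt]
      simp only [← hlow, hisin, if_true]
      have E : ∀ (s : String) (t : List Char), s.toList = '_' :: t → '_' ∉ t →
          (PySem.Str.endswith lower s = true ↔ (pvLastSeg lower).toList = t) := by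
        intro s t hs hnt
        rw [pv_endswith_char lower s t hs hnt]
        simp [hu]
      have hmem : PySem.Set.contains pvSuffixSet ("_" ++ pvLastSeg lower) = true ↔
          ((pvLastSeg lower).toList = ['i','d'] ∨ (pvLastSeg lower).toList = ['n','o'] ∨ (pvLastSeg lower).toList = ['b','h'] ∨ (pvLastSeg lower).toList = ['d','m'] ∨ (pvLastSeg lower).toList = ['m','c'] ∨ (pvLastSeg lower).toList = ['s','j'] ∨ (pvLastSeg lower).toList = ['r','q'] ∨ (pvLastSeg lower).toList = ['t','i','m','e'] ∨ (pvLastSeg lower).toList = ['d','a','t','e'] ∨ (pvLastSeg lower).toList = ['n','a','m','e'] ∨ (pvLastSeg lower).toList = ['c','o','d','e'] ∨ (pvLastSeg lower).toList = ['t','y','p','e']) := by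
        simp [PySem.Set.contains, pvSuffixSet, PySem.Set.ofList, String.ext_iff]
      simp only [pvSuffixes, pvLoopA,
        E "_id" ['i','d'] (by decide) (by decide),
        E "_no" ['n','o'] (by decide) (by decide),
        E "_bh" ['b','h'] (by decide) (by decide),
        E "_dm" ['d','m'] (by decide) (by decide),
        E "_mc" ['m','c'] (by decide) (by decide),
        E "_sj" ['s','j'] (by decide) (by decide),
        E "_rq" ['r','q'] (by decide) (by decide),
        E "_time" ['t','i','m','e'] (by decide) (by decide),
        E "_date" ['d','a','t','e'] (by decide) (by decide),
        E "_name" ['n','a','m','e'] (by decide) (by decide),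
        E "_code" ['c','o','d','e'] (by decide) (by decide),
        E "_type" ['t','y','p','e'] (by decide) (by decide),
        hmem]
      exact pv_table (pvLastSeg lower)
    · have hisin : PySem.Str.isIn "_" lower = false := by
        rw [Bool.eq_false_iff]
        intro hc
        rw [PySem.Str.isIn_iff_infix] at hc
        exact hu (hc.subset (by decide))
      rw [extract_suffix_alt]
      simp only [← hlow, hisin, Bool.false_eq_true, if_false]
      exact pv_loopA_empty lower pvSuffixes (by
        intro suf hsuf
        fin_cases hsuf <;> exact pv_endswith_false lower _ hu (by decide))
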